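-- pv_equiv track=rewrite | github.com/alexander-jaferey/MusicSchoolApp | main.py | check_instruments
-- ===== SOURCE A (Python) =====
-- def check_instruments(new_instruments, instruments_dict):
--     new_instruments_list = []
--
--     try:
--         for instrument in new_instruments:
--             if instrument.title() not in instruments_dict:
--                 raise BadInfoError(
--                     {
--                         "code": 422,
--                         "description": f"Instrument '{instrument.title()}' not in list. If this was not a mistake, add instrument first.",
--                     },
--                     422,
--                 )
--
--             else:
--                 new_instruments_list.append(instrument.title())
--
--     except:
--         raise BadInfoError(
--             {
--                 "code": 422,
--                 "description": "Check documentation for proper instruments formatting",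
--             },
--             422,
--         )
--
--     return new_instruments_list
--
-- class BadInfoError(Exception):
--     def __init__(self, error, status_code):
--         self.error = error
--         self.status_code = status_code
-- ===== SOURCE B (Python) =====
-- def check_instruments(new_instruments, instruments_dict):
--     titled = [i.title() for i in new_instruments]
--     missing = set(titled) - set(instruments_dict)
--     if missing:
--         raise BadInfoError(
--             {
--                 "code": 422,
--                 "description": "Check documentation for proper instruments formatting",
--             },
--             422,
--         )
--     return titled
--
--
-- class BadInfoError(Exception):
--     def __init__(self, error, status_code):
--         self.error = error
--         self.status_code = status_code
-- ===== Notes on version B (the rewrite author's own statement) =====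
-- stated objective: alternative
-- what changed: B replaces A's try/except-wrapped check-and-accumulate loop (which raises a specific error per missing element that the bare except swallows into a generic one) by set algebra: titlecase once with a comprehension, validate all elements at once via the set difference set(titled) - set(instruments_dict), raising the generic error only if that difference is non-empty; there is no per-element validation loop, no accumulator and no try/except.
import Mathlib
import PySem

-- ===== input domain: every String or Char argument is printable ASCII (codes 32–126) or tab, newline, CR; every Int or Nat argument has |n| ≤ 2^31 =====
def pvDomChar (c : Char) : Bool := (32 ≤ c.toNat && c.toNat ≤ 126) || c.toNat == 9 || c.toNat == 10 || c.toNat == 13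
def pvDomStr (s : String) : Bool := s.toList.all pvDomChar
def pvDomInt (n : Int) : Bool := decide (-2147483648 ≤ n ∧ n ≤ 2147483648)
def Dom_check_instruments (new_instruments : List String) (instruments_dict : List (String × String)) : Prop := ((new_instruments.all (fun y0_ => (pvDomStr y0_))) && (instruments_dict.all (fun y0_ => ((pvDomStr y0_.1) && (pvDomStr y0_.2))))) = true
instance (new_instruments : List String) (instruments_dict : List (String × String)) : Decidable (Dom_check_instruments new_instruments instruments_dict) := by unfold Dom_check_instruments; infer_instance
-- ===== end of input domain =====

-- B replaces A's try/except-wrapped check-and-accumulate loop by a titlecase map plus one set-difference validation (no per-element check loop); objective: alternative. Return-value equivalence on Pre_ (every titlecased element a dict key; elsewhere A raises).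


-- hand-port of Python str.title(), exact on the ASCII domain: a letter is
-- uppercased when the previous character is not a letter, lowercased otherwise
-- (for ASCII, 'cased' coincides with isalpha); non-letters pass through.
def pyTitleAux : Bool → List Char → List Char
  | _, [] => []
  | prevCased, c :: cs =>
      if PySem.Chars.isalpha c then
        (if prevCased then PySem.Chars.lowerChar c else PySem.Chars.upperChar c) :: pyTitleAux true cs
      else
        c :: pyTitleAux false cs

def pyTitle (s : String) : String := String.ofList (pyTitleAux false s.toList)

-- ===== PORT A =====
-- A's loop with its growing accumulator; the raise branch (title not a key)
-- is excluded by Pre_; there the port just stops with the partial list.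
def check_instruments_go (instruments_dict : List (String × String)) :
    List String → List String → List String
  | acc, [] => acc
  | acc, instrument :: rest =>
      if (instruments_dict.map Prod.fst).contains (pyTitle instrument) = false then
        acc  -- raise BadInfoError (swallowed into the generic one); outside Pre_
      else
        check_instruments_go instruments_dict (acc ++ [pyTitle instrument]) rest

def check_instruments (new_instruments : List String) (instruments_dict : List (String × String)) : List String :=
  check_instruments_go instruments_dict [] new_instruments

-- ===== PORT B =====
-- B: titlecase once, then one set difference set(titled) - set(dict keys);
-- non-empty difference = raise (outside Pre_), else return the titled list.
def check_instruments_alt (new_instruments : List String) (instruments_dict : List (String × String)) : List String :=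
  let titled := new_instruments.map pyTitle
  let missing := PySem.Set.diff (PySem.Set.ofList titled) (PySem.Set.ofList (instruments_dict.map Prod.fst))
  if missing.isEmpty then titled
  else []  -- raise BadInfoError (generic); outside Pre_

-- ===== PRECONDITION & SPEC =====
-- Pre_: every titlecased element is a key of the dict — exactly the inputs on
-- which the Python A returns (otherwise A raises BadInfoError). pyTitle here is
-- the str.title() primitive (a per-character map, like PySem.Str.lower), not a
-- re-simulation of either port's loop: membership of s.title() in the keys is
-- the closed-form condition a reader checks per element.
def Pre_check_instruments (new_instruments : List String) (instruments_dict : List (String × String)) : Prop :=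
  new_instruments.all (fun s => (instruments_dict.map Prod.fst).contains (pyTitle s)) = true
instance (new_instruments : List String) (instruments_dict : List (String × String)) : Decidable (Pre_check_instruments new_instruments instruments_dict) := by unfold Pre_check_instruments; infer_instance

def pvWitness_check_instruments : List String × (List (String × String)) :=
  (["flute", "aLTo saX"], [("Flute", "woodwind"), ("Alto Sax", "woodwind")])

def Spec_check_instruments (new_instruments : List String) (instruments_dict : List (String × String)) (out : List String) : Prop := out = check_instruments_alt new_instruments instruments_dict
instance (new_instruments : List String) (instruments_dict : List (String × String)) (out : List String) : Decidable (Spec_check_instruments new_instruments instruments_dict out) := by unfold Spec_check_instruments; infer_instance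

-- ===== CLAIM (what is proved, stated in full; the proofs are below) =====
def Claim_equal_check_instruments : Prop := ∀ (new_instruments : List String) (instruments_dict : List (String × String)), Dom_check_instruments new_instruments instruments_dict → Pre_check_instruments new_instruments instruments_dict → Spec_check_instruments new_instruments instruments_dict (check_instruments new_instruments instruments_dict)

-- ===== LEMMAS AND PROOFS =====
theorem check_instruments_go_eq (instruments_dict : List (String × String))
    (l : List String) (acc : List String)
    (h : l.all (fun s => (instruments_dict.map Prod.fst).contains (pyTitle s)) = true) :
    check_instruments_go instruments_dict acc l = acc ++ l.map pyTitle := by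
  induction l generalizing acc with
  | nil => simp [check_instruments_go]
  | cons x xs ih =>
      simp only [List.all_cons, Bool.and_eq_true] at h
      rw [check_instruments_go, h.1]
      simp [ih (acc ++ [pyTitle x]) h.2]

-- under Pre_, the set difference in B is empty
theorem missing_empty (new_instruments : List String) (instruments_dict : List (String × String))
    (h : Pre_check_instruments new_instruments instruments_dict) :
    (PySem.Set.diff (PySem.Set.ofList (new_instruments.map pyTitle))
      (PySem.Set.ofList (instruments_dict.map Prod.fst))).isEmpty = true := by
  unfold Pre_check_instruments at h
  rw [List.isEmpty_iff, List.eq_nil_iff_forall_not_mem]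
  intro t ht
  rw [PySem.Set.mem_diff] at ht
  obtain ⟨ht1, ht2⟩ := ht
  rw [PySem.Set.mem_ofList, List.mem_map] at ht1
  obtain ⟨s, hs, rfl⟩ := ht1
  rw [List.all_eq_true] at h
  exact ht2 (by rw [PySem.Set.mem_ofList]; simpa using h s hs)

-- ===== VERDICT (by name: the statement is the Claim_ definition above) =====
theorem check_instruments_spec : Claim_equal_check_instruments := by
  intro ni d _ hpre
  unfold Spec_check_instruments check_instruments check_instruments_alt
  rw [check_instruments_go_eq d ni [] hpre]
  simp only [List.nil_append]
  rw [if_pos (missing_empty ni d hpre)]
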